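-- pv_equiv track=rewrite | github.com/DennisJohansson423/TDDD92 | DFBB.py | calculate_mineral_gas_cost
-- ===== SOURCE A (Python) =====
-- def calculate_mineral_gas_cost(needed):
--     """Calculates total mineral and gas costs for needed."""
--     starcraft_costs = {
--     "units": {
--         "SCV": {"minerals": 50, "gas": 0},
--         "MARINE": {"minerals": 50, "gas": 0},
--         "MEDIVAC": {"minerals": 100, "gas": 100},
--         "SIEGETANK": {"minerals": 150, "gas": 125},
--         "SCV": {"minerals": 50, "gas": 0},
--         "MARINE": {"minerals": 50, "gas": 0},
--         "MEDIVAC": {"minerals": 100, "gas": 100},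
--         "SIEGETANK": {"minerals": 150, "gas": 125}
--     },
--     "buildings": {
--         "BARRACKS": {"minerals": 150, "gas": 0},
--         "FACTORY": {"minerals": 150, "gas": 100},
--         "FACTORY TECHLAB": {"minerals": 50, "gas": 25},
--         "STARPORT": {"minerals": 150, "gas": 100},
--         "SUPPLY DEPOT": {"minerals": 100, "gas": 0},
--         "ENGINEERING BAY": {"minerals": 125, "gas": 0},
--         "REFINERY": {"minerals": 75, "gas": 0},
--         "ARMORY": {"minerals": 150, "gas": 100},
--         "COMMAND CENTER": {"minerals": 400, "gas": 0},
--         "BUNKER": {"minerals": 100, "gas": 0},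
--         "PLANETARY FORTRESS": {"minerals": 150, "gas": 150},
--         "SENSORTOWER": {"minerals": 100, "gas": 50}
--     },
--     "upgrades": {
--         "TERRANINFANTRYWEAPONSLEVEL1": {"minerals": 100, "gas": 100},
--         "TERRANINFANTRYARMORSLEVEL1": {"minerals": 100, "gas": 100},
--         "TERRANINFANTRYWEAPONSLEVEL2": {"minerals": 175, "gas": 175},
--         "TERRANINFANTRYARMORSLEVEL2": {"minerals": 175, "gas": 175}
--         }
--     }
--     total_minerals = 0
--     total_gas = 0
--     for task, count in needed.items():
--         task_type = task.split(" x")[0]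
--         task_name = task_type.strip()
--
--         if task_name in starcraft_costs["units"]:
--             cost = starcraft_costs["units"][task_name]
--         elif task_name in starcraft_costs["buildings"]:
--             cost = starcraft_costs["buildings"][task_name]
--         elif task_name in starcraft_costs["upgrades"]:
--             cost = starcraft_costs["upgrades"][task_name]
--         else:
--             continue
--         total_minerals += cost["minerals"] * count
--         total_gas += cost["gas"] * count
--
--     if total_minerals >= total_gas:
--         return "prio_minerals"
--     else:
--         return "prio_gas"
-- ===== SOURCE B (Python) =====
-- # Only the sign of (total_minerals - total_gas) determines the answer, so we
-- # keep a single signed balance using a name -> minerals-minus-gas delta table.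
-- # Names whose mineral and gas costs are equal (MEDIVAC, PLANETARY FORTRESS and
-- # all upgrades) contribute 0 to the balance and are simply absent from the table.
-- DELTA = {
--     "SCV": 50,
--     "MARINE": 50,
--     "SIEGETANK": 25,
--     "BARRACKS": 150,
--     "FACTORY": 50,
--     "FACTORY TECHLAB": 25,
--     "STARPORT": 50,
--     "SUPPLY DEPOT": 100,
--     "ENGINEERING BAY": 125,
--     "REFINERY": 75,
--     "ARMORY": 50,
--     "COMMAND CENTER": 400,
--     "BUNKER": 100,
--     "SENSORTOWER": 50,
-- }
--
--
-- def calculate_mineral_gas_cost(needed):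
--     """Calculates total mineral and gas costs for needed."""
--     balance = 0
--     for task, count in needed.items():
--         balance += DELTA.get(task.split(" x")[0].strip(), 0) * count
--     return "prio_minerals" if balance >= 0 else "prio_gas"
-- ===== Notes on version B (the rewrite author's own statement) =====
-- stated objective: alternative
-- what changed: B exploits that only the sign of total_minerals - total_gas matters: instead of summing two totals from three category cost dicts, it keeps a single signed balance driven by a name -> (minerals minus gas) delta table that omits every name with equal mineral and gas cost, and decides on the balance's sign.
import Mathlib
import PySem

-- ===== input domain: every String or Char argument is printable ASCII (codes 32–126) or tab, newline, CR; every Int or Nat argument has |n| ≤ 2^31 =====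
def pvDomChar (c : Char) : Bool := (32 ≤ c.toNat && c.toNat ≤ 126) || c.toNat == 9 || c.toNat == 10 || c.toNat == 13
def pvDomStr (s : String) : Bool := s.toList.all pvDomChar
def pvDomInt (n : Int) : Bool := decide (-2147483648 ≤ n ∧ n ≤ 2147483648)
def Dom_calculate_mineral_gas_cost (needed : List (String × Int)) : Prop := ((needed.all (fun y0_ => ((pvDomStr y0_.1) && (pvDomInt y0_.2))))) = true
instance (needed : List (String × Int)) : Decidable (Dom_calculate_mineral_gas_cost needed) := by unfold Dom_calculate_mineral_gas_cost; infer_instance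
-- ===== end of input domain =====

-- B keeps a single signed minerals-minus-gas balance from a delta table (names with
-- equal costs omitted) instead of A's two totals over three category dicts; only the
-- RETURN value's equality is proved (objective: alternative).

-- ===== PORT A =====
-- A's three category dicts (the duplicate entries of the "units" literal are kept:
-- a Python dict literal overwrites in place, as PySem.Dict.ofList does).
def pvUnits : PySem.Dict String (PySem.Dict String Int) := PySem.Dict.ofList
  [("SCV", PySem.Dict.ofList [("minerals", 50), ("gas", 0)]),
   ("MARINE", PySem.Dict.ofList [("minerals", 50), ("gas", 0)]),
   ("MEDIVAC", PySem.Dict.ofList [("minerals", 100), ("gas", 100)]),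
   ("SIEGETANK", PySem.Dict.ofList [("minerals", 150), ("gas", 125)]),
   ("SCV", PySem.Dict.ofList [("minerals", 50), ("gas", 0)]),
   ("MARINE", PySem.Dict.ofList [("minerals", 50), ("gas", 0)]),
   ("MEDIVAC", PySem.Dict.ofList [("minerals", 100), ("gas", 100)]),
   ("SIEGETANK", PySem.Dict.ofList [("minerals", 150), ("gas", 125)])]

def pvBuildings : PySem.Dict String (PySem.Dict String Int) := PySem.Dict.ofList
  [("BARRACKS", PySem.Dict.ofList [("minerals", 150), ("gas", 0)]),
   ("FACTORY", PySem.Dict.ofList [("minerals", 150), ("gas", 100)]),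
   ("FACTORY TECHLAB", PySem.Dict.ofList [("minerals", 50), ("gas", 25)]),
   ("STARPORT", PySem.Dict.ofList [("minerals", 150), ("gas", 100)]),
   ("SUPPLY DEPOT", PySem.Dict.ofList [("minerals", 100), ("gas", 0)]),
   ("ENGINEERING BAY", PySem.Dict.ofList [("minerals", 125), ("gas", 0)]),
   ("REFINERY", PySem.Dict.ofList [("minerals", 75), ("gas", 0)]),
   ("ARMORY", PySem.Dict.ofList [("minerals", 150), ("gas", 100)]),
   ("COMMAND CENTER", PySem.Dict.ofList [("minerals", 400), ("gas", 0)]),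
   ("BUNKER", PySem.Dict.ofList [("minerals", 100), ("gas", 0)]),
   ("PLANETARY FORTRESS", PySem.Dict.ofList [("minerals", 150), ("gas", 150)]),
   ("SENSORTOWER", PySem.Dict.ofList [("minerals", 100), ("gas", 50)])]

def pvUpgrades : PySem.Dict String (PySem.Dict String Int) := PySem.Dict.ofList
  [("TERRANINFANTRYWEAPONSLEVEL1", PySem.Dict.ofList [("minerals", 100), ("gas", 100)]),
   ("TERRANINFANTRYARMORSLEVEL1", PySem.Dict.ofList [("minerals", 100), ("gas", 100)]),
   ("TERRANINFANTRYWEAPONSLEVEL2", PySem.Dict.ofList [("minerals", 175), ("gas", 175)]),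
   ("TERRANINFANTRYARMORSLEVEL2", PySem.Dict.ofList [("minerals", 175), ("gas", 175)])]

-- cost["minerals"] / cost["gas"] are ported with getD: the keys are always present.
def calculate_mineral_gas_cost (needed : List (String × Int)) : String :=
  let totals := needed.foldl (fun (acc : Int × Int) kv =>
    let task := kv.1
    let count := kv.2
    let task_type := ((PySem.Str.split? task " x").getD []).headD ""
    let task_name := PySem.Str.strip task_type
    if pvUnits.contains task_name then
      let cost := pvUnits.getD task_name PySem.Dict.empty
      (acc.1 + cost.getD "minerals" 0 * count, acc.2 + cost.getD "gas" 0 * count)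
    else if pvBuildings.contains task_name then
      let cost := pvBuildings.getD task_name PySem.Dict.empty
      (acc.1 + cost.getD "minerals" 0 * count, acc.2 + cost.getD "gas" 0 * count)
    else if pvUpgrades.contains task_name then
      let cost := pvUpgrades.getD task_name PySem.Dict.empty
      (acc.1 + cost.getD "minerals" 0 * count, acc.2 + cost.getD "gas" 0 * count)
    else acc) (0, 0)
  if totals.1 ≥ totals.2 then "prio_minerals" else "prio_gas"

-- ===== PORT B =====
-- delta table: name → minerals − gas; names with delta 0 are absent (get defaults to 0)
def pvDelta : PySem.Dict String Int := PySem.Dict.ofList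
  [("SCV", 50), ("MARINE", 50), ("SIEGETANK", 25), ("BARRACKS", 150),
   ("FACTORY", 50), ("FACTORY TECHLAB", 25), ("STARPORT", 50),
   ("SUPPLY DEPOT", 100), ("ENGINEERING BAY", 125), ("REFINERY", 75),
   ("ARMORY", 50), ("COMMAND CENTER", 400), ("BUNKER", 100), ("SENSORTOWER", 50)]

def calculate_mineral_gas_cost_alt (needed : List (String × Int)) : String :=
  let balance := needed.foldl (fun (b : Int) kv =>
    b + pvDelta.getD (PySem.Str.strip (((PySem.Str.split? kv.1 " x").getD []).headD "")) 0 * kv.2) 0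
  if balance ≥ 0 then "prio_minerals" else "prio_gas"

-- ===== PRECONDITION & SPEC ===== (A is total: no Pre_)
def Spec_calculate_mineral_gas_cost (needed : List (String × Int)) (out : String) : Prop := out = calculate_mineral_gas_cost_alt needed
instance (needed : List (String × Int)) (out : String) : Decidable (Spec_calculate_mineral_gas_cost needed out) := by unfold Spec_calculate_mineral_gas_cost; infer_instance

-- ===== CLAIM (what is proved, stated in full; the proofs are below) =====
def Claim_equal_calculate_mineral_gas_cost : Prop := ∀ (needed : List (String × Int)), Dom_calculate_mineral_gas_cost needed → Spec_calculate_mineral_gas_cost needed (calculate_mineral_gas_cost needed)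

-- ===== LEMMAS AND PROOFS =====

-- literal (Dict.mk) normal forms of the tables, used to evaluate the lookups
theorem pvUnits_mk : pvUnits = PySem.Dict.mk [("SCV", PySem.Dict.mk [("minerals", 50), ("gas", 0)]), ("MARINE", PySem.Dict.mk [("minerals", 50), ("gas", 0)]), ("MEDIVAC", PySem.Dict.mk [("minerals", 100), ("gas", 100)]), ("SIEGETANK", PySem.Dict.mk [("minerals", 150), ("gas", 125)])] := by decide
theorem pvBuildings_mk : pvBuildings = PySem.Dict.mk [("BARRACKS", PySem.Dict.mk [("minerals", 150), ("gas", 0)]), ("FACTORY", PySem.Dict.mk [("minerals", 150), ("gas", 100)]), ("FACTORY TECHLAB", PySem.Dict.mk [("minerals", 50), ("gas", 25)]), ("STARPORT", PySem.Dict.mk [("minerals", 150), ("gas", 100)]), ("SUPPLY DEPOT", PySem.Dict.mk [("minerals", 100), ("gas", 0)]), ("ENGINEERING BAY", PySem.Dict.mk [("minerals", 125), ("gas", 0)]), ("REFINERY", PySem.Dict.mk [("minerals", 75), ("gas", 0)]), ("ARMORY", PySem.Dict.mk [("minerals", 150), ("gas", 100)]), ("COMMAND CENTER", PySem.Dict.mk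 [("minerals", 400), ("gas", 0)]), ("BUNKER", PySem.Dict.mk [("minerals", 100), ("gas", 0)]), ("PLANETARY FORTRESS", PySem.Dict.mk [("minerals", 150), ("gas", 150)]), ("SENSORTOWER", PySem.Dict.mk [("minerals", 100), ("gas", 50)])] := by decide
theorem pvUpgrades_mk : pvUpgrades = PySem.Dict.mk [("TERRANINFANTRYWEAPONSLEVEL1", PySem.Dict.mk [("minerals", 100), ("gas", 100)]), ("TERRANINFANTRYARMORSLEVEL1", PySem.Dict.mk [("minerals", 100), ("gas", 100)]), ("TERRANINFANTRYWEAPONSLEVEL2", PySem.Dict.mk [("minerals", 175), ("gas", 175)]), ("TERRANINFANTRYARMORSLEVEL2", PySem.Dict.mk [("minerals", 175), ("gas", 175)])] := by decide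
theorem pvDelta_mk : pvDelta = PySem.Dict.mk [("SCV", 50), ("MARINE", 50), ("SIEGETANK", 25), ("BARRACKS", 150), ("FACTORY", 50), ("FACTORY TECHLAB", 25), ("STARPORT", 50), ("SUPPLY DEPOT", 100), ("ENGINEERING BAY", 125), ("REFINERY", 75), ("ARMORY", 50), ("COMMAND CENTER", 400), ("BUNKER", 100), ("SENSORTOWER", 50)] := by decide

-- Per-name: A's minerals-minus-gas for the resolved cost equals B's delta-table entry.
theorem pvDelta_eq (name : String) :
    (if pvUnits.contains name then
       (pvUnits.getD name PySem.Dict.empty).getD "minerals" 0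
         - (pvUnits.getD name PySem.Dict.empty).getD "gas" 0
     else if pvBuildings.contains name then
       (pvBuildings.getD name PySem.Dict.empty).getD "minerals" 0
         - (pvBuildings.getD name PySem.Dict.empty).getD "gas" 0
     else if pvUpgrades.contains name then
       (pvUpgrades.getD name PySem.Dict.empty).getD "minerals" 0
         - (pvUpgrades.getD name PySem.Dict.empty).getD "gas" 0
     else 0) = pvDelta.getD name 0 := by
  by_cases h0 : name = "SCV"
  · subst h0; decide
  by_cases h1 : name = "MARINE"
  · subst h1; decide
  by_cases h2 : name = "MEDIVAC"
  · subst h2; decide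
  by_cases h3 : name = "SIEGETANK"
  · subst h3; decide
  by_cases h4 : name = "BARRACKS"
  · subst h4; decide
  by_cases h5 : name = "FACTORY"
  · subst h5; decide
  by_cases h6 : name = "FACTORY TECHLAB"
  · subst h6; decide
  by_cases h7 : name = "STARPORT"
  · subst h7; decide
  by_cases h8 : name = "SUPPLY DEPOT"
  · subst h8; decide
  by_cases h9 : name = "ENGINEERING BAY"
  · subst h9; decide
  by_cases h10 : name = "REFINERY"
  · subst h10; decide
  by_cases h11 : name = "ARMORY"
  · subst h11; decide
  by_cases h12 : name = "COMMAND CENTER"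
  · subst h12; decide
  by_cases h13 : name = "BUNKER"
  · subst h13; decide
  by_cases h14 : name = "PLANETARY FORTRESS"
  · subst h14; decide
  by_cases h15 : name = "SENSORTOWER"
  · subst h15; decide
  by_cases h16 : name = "TERRANINFANTRYWEAPONSLEVEL1"
  · subst h16; decide
  by_cases h17 : name = "TERRANINFANTRYARMORSLEVEL1"
  · subst h17; decide
  by_cases h18 : name = "TERRANINFANTRYWEAPONSLEVEL2"
  · subst h18; decide
  by_cases h19 : name = "TERRANINFANTRYARMORSLEVEL2"
  · subst h19; decide
  rw [pvUnits_mk, pvBuildings_mk, pvUpgrades_mk, pvDelta_mk]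
  simp [PySem.Dict.contains_mk, PySem.Dict.getD_eq_get?_getD, PySem.Dict.get?, Ne.symm h0, Ne.symm h1, Ne.symm h2, Ne.symm h3, Ne.symm h4, Ne.symm h5, Ne.symm h6, Ne.symm h7, Ne.symm h8, Ne.symm h9, Ne.symm h10, Ne.symm h11, Ne.symm h12, Ne.symm h13, Ne.symm h14, Ne.symm h15, Ne.symm h16, Ne.symm h17, Ne.symm h18, Ne.symm h19]

-- Fold invariant: the difference of A's two running totals advances exactly as B's balance.
theorem pvFold_sub (l : List (String × Int)) : ∀ (acc : Int × Int) (b : Int),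
    (l.foldl (fun (acc : Int × Int) kv =>
      let task := kv.1
      let count := kv.2
      let task_type := ((PySem.Str.split? task " x").getD []).headD ""
      let task_name := PySem.Str.strip task_type
      if pvUnits.contains task_name then
        let cost := pvUnits.getD task_name PySem.Dict.empty
        (acc.1 + cost.getD "minerals" 0 * count, acc.2 + cost.getD "gas" 0 * count)
      else if pvBuildings.contains task_name then
        let cost := pvBuildings.getD task_name PySem.Dict.empty
        (acc.1 + cost.getD "minerals" 0 * count, acc.2 + cost.getD "gas" 0 * count)
      else if pvUpgrades.contains task_name then
        let cost := pvUpgrades.getD task_name PySem.Dict.empty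
        (acc.1 + cost.getD "minerals" 0 * count, acc.2 + cost.getD "gas" 0 * count)
      else acc) acc).1
    - (l.foldl (fun (acc : Int × Int) kv =>
      let task := kv.1
      let count := kv.2
      let task_type := ((PySem.Str.split? task " x").getD []).headD ""
      let task_name := PySem.Str.strip task_type
      if pvUnits.contains task_name then
        let cost := pvUnits.getD task_name PySem.Dict.empty
        (acc.1 + cost.getD "minerals" 0 * count, acc.2 + cost.getD "gas" 0 * count)
      else if pvBuildings.contains task_name then
        let cost := pvBuildings.getD task_name PySem.Dict.empty
        (acc.1 + cost.getD "minerals" 0 * count, acc.2 + cost.getD "gas" 0 * count)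
      else if pvUpgrades.contains task_name then
        let cost := pvUpgrades.getD task_name PySem.Dict.empty
        (acc.1 + cost.getD "minerals" 0 * count, acc.2 + cost.getD "gas" 0 * count)
      else acc) acc).2
    = acc.1 - acc.2
      + ((l.foldl (fun (b : Int) kv =>
          b + pvDelta.getD (PySem.Str.strip (((PySem.Str.split? kv.1 " x").getD []).headD "")) 0 * kv.2) b) - b) := by
  induction l with
  | nil => intro acc b; simp
  | cons kv rest ih =>
    intro acc b
    simp only [List.foldl_cons]
    have h := pvDelta_eq (PySem.Str.strip (((PySem.Str.split? kv.1 " x").getD []).headD ""))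
    split_ifs at h ⊢ <;>
      rw [ih _ (b + pvDelta.getD (PySem.Str.strip (((PySem.Str.split? kv.1 " x").getD []).headD "")) 0 * kv.2)] <;>
      rw [← h] <;> ring

-- ===== VERDICT (by name: the statement is the Claim_ definition above) =====
theorem calculate_mineral_gas_cost_spec : Claim_equal_calculate_mineral_gas_cost := by
  intro needed _
  unfold Spec_calculate_mineral_gas_cost calculate_mineral_gas_cost calculate_mineral_gas_cost_alt
  have h := pvFold_sub needed (0, 0) 0
  simp only [] at h ⊢
  split_ifs with hA hB hB
  · rfl
  · exfalso; omega
  · exfalso; omega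
  · rfl
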